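-- pv_equiv track=rewrite | github.com/mavdian14/Portfolio | Dynamic Programming/Prime XOR.py | primeXor
-- ===== SOURCE A (Python) =====
-- from collections import Counter
--
-- MAX=8192
--
-- MOD=10**9+7
--
-- prime=[True for i in range(MAX+1)]
--
-- def sieve():
--     prime[0]=prime[1]=False
--     for p in range(2,MAX+1):
--         if prime[p]==True:
--             for j in range(2*p,MAX+1,p):
--                 prime[j]=False
--
-- def primeXor(a):
--     sieve()
--     count=0
--     c = Counter(a)
--     M = 8192
--
--     dp = [0] * M
--     dp[0] = 1
--     range_M = range(M)
--
--     for e in c.keys():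
--         even, odd = (c[e]//2 + 1), ((c[e] + 1)//2)
--         dp = [(dp[i] * even + dp[i^e] * odd) % MOD for i in range_M]
--
--     for j in range_M:
--         if prime[j]:
--             count += dp[j]
--             if count > MOD:
--                 count %= MOD
--
--     return count%MOD
-- ===== SOURCE B (Python) =====
-- from collections import Counter
--
-- MAX = 8192
-- MOD = 10**9 + 7
--
-- prime = [True for i in range(MAX + 1)]
--
-- def sieve():
--     prime[0] = prime[1] = False
--     for p in range(2, MAX + 1):
--         if prime[p] == True:
--             for j in range(2 * p, MAX + 1, p):
--                 prime[j] = False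
--
-- def _iwht(v):
--     # divide-and-conquer Walsh-Hadamard transform (self-inverse up to the factor len(v))
--     if len(v) <= 1:
--         return v[:]
--     m = len(v) // 2
--     a = _iwht(v[:m])
--     b = _iwht(v[m:])
--     return [(x + y) % MOD for x, y in zip(a, b)] + [(x - y) % MOD for x, y in zip(a, b)]
--
-- def primeXor(a):
--     sieve()
--     M = 8192
--     c = Counter(a)
--     # pointwise product, in the Walsh-Hadamard frequency domain, of the per-element factors
--     F = [1] * M
--     for e in c.keys():
--         even, odd = c[e] // 2 + 1, (c[e] + 1) // 2
--         plus, minus = (even + odd) % MOD, (even - odd) % MOD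
--         F = [F[k] * (plus if (k & e).bit_count() % 2 == 0 else minus) % MOD for k in range(M)]
--     inv = pow(M, MOD - 2, MOD)
--     dp = [x * inv % MOD for x in _iwht(F)]
--     return sum(dp[j] for j in range(M) if prime[j]) % MOD
-- ===== Notes on version B (the rewrite author's own statement) =====
-- stated objective: alternative
-- what changed: Instead of repeatedly XOR-convolving a dense 8192-entry dp table (one full shifted-add pass per distinct element), B works in the Walsh-Hadamard frequency domain: each distinct element contributes a pointwise sign factor (even+odd or even-odd by popcount parity), the factors are multiplied pointwise, and a single divide-and-conquer inverse Walsh-Hadamard transform (scaled by the modular inverse of 8192) recovers dp before summing over prime indices.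
import Mathlib
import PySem

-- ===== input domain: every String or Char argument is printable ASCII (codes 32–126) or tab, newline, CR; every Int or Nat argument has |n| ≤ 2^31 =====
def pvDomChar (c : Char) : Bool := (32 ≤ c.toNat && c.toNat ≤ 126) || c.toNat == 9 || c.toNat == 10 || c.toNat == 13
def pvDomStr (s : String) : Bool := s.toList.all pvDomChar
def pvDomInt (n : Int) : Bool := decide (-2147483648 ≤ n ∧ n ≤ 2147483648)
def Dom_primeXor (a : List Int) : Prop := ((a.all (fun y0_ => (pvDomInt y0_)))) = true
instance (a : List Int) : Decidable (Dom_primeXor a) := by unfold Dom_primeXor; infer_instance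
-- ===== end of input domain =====

set_option maxRecDepth 40000


-- ===== PORT A =====
-- B differs from A by computing dp in the Walsh-Hadamard frequency domain (alternative algorithm, same results).
-- A mutates the module-level list `prime` via sieve(); sieve() is idempotent and primeXor only reads the table,
-- so both ports recompute the (identical) table pvSieve; the equivalence proved is about the return value.

def pvMOD : Int := 1000000007

-- the module-level `prime` table after sieve() (list assignment prime[j]=False with 0 <= j < len ported as List.set, exact)
def pvSieve : List Bool :=
  let p0 := ((List.replicate 8193 true).set 0 false).set 1 false
  (PySem.List.pyRange 2 8193 1).foldl (fun pr p =>
    if pr.getD p.toNat false then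
      (PySem.List.pyRange (2 * p) 8193 p).foldl (fun pr2 j => pr2.set j.toNat false) pr
    else pr) p0

-- dp = [(dp[i]*even + dp[i^e]*odd) % MOD for i in range_M]
-- dp[i^e] can raise IndexError (pyGet? = none); those inputs are excluded by Pre_primeXor, .getD 0 is unreachable there
def pvConvA (dp : List Int) (e even odd : Int) : List Int :=
  (PySem.List.pyRange 0 8192 1).map (fun i =>
    PySem.Int.mod (PySem.List.pyGetD dp i 0 * even
      + ((PySem.List.pyGet? dp (PySem.Int.bxor i e)).getD 0) * odd) pvMOD)

def primeXor (a : List Int) : Int :=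
  let pr := pvSieve
  let c := PySem.Dict.counter a
  let dp0 : List Int := (List.replicate 8192 (0 : Int)).set 0 1
  let dp := c.keys.foldl (fun dp e =>
      pvConvA dp e (PySem.Int.floordiv (c.getD e 0) 2 + 1)
        (PySem.Int.floordiv (c.getD e 0 + 1) 2)) dp0
  let count := (PySem.List.pyRange 0 8192 1).foldl (fun count j =>
      if pr.getD j.toNat false then
        let count' := count + PySem.List.pyGetD dp j 0
        if count' > pvMOD then PySem.Int.mod count' pvMOD else count'
      else count) 0
  PySem.Int.mod count pvMOD

-- ===== PORT B =====
-- _iwht(v): divide-and-conquer Walsh-Hadamard transform; v[:m] / v[m:] ported as take/drop (exact: 0 <= m <= len).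
-- The recursion is driven by a structural fuel (= length+1, strictly larger than the recursion depth) so that the
-- definition is structural; pvIwhtAux fuel v = _iwht(v) whenever v.length <= fuel.
def pvIwhtAux : Nat → List Int → List Int
  | 0, v => v
  | fuel + 1, v =>
    if v.length ≤ 1 then v
    else
      let m := v.length / 2
      let a := pvIwhtAux fuel (v.take m)
      let b := pvIwhtAux fuel (v.drop m)
      (List.zipWith (fun x y => PySem.Int.mod (x + y) pvMOD) a b)
        ++ (List.zipWith (fun x y => PySem.Int.mod (x - y) pvMOD) a b)

def pvIwht (v : List Int) : List Int := pvIwhtAux v.length v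

-- pow(b, e, m) for e >= 0, m > 0: modular binary exponentiation (what CPython's 3-arg pow computes),
-- with a structural fuel > number of halvings of e.
def pvPowModAux : Nat → Int → Nat → Int → Int
  | 0, _, _, m => PySem.Int.mod 1 m
  | fuel + 1, b, e, m =>
    if e = 0 then PySem.Int.mod 1 m
    else
      let r := pvPowModAux fuel b (e / 2) m
      let r2 := PySem.Int.mod (r * r) m
      if e % 2 = 1 then PySem.Int.mod (r2 * b) m else r2

def pvPowMod (b : Int) (e : Nat) (m : Int) : Int := pvPowModAux (e + 1) b e m

-- F = [F[k] * (plus if (k & e).bit_count() % 2 == 0 else minus) % MOD for k in range(M)]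
def pvFactB (F : List Int) (e even odd : Int) : List Int :=
  let plus := PySem.Int.mod (even + odd) pvMOD
  let minus := PySem.Int.mod (even - odd) pvMOD
  (PySem.List.pyRange 0 8192 1).map (fun k =>
    PySem.Int.mod (PySem.List.pyGetD F k 0 *
      (if PySem.Int.mod ((PySem.Int.bitCount (PySem.Int.band k e) : Int)) 2 = 0 then plus else minus)) pvMOD)

def primeXor_alt (a : List Int) : Int :=
  let pr := pvSieve
  let c := PySem.Dict.counter a
  let F := c.keys.foldl (fun F e =>
      pvFactB F e (PySem.Int.floordiv (c.getD e 0) 2 + 1)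
        (PySem.Int.floordiv (c.getD e 0 + 1) 2)) (List.replicate 8192 (1 : Int))
  let inv := pvPowMod 8192 (pvMOD - 2).toNat pvMOD
  let dp := (pvIwht F).map (fun x => PySem.Int.mod (x * inv) pvMOD)
  PySem.Int.mod ((PySem.List.pyRange 0 8192 1).foldl (fun s j =>
      if pr.getD j.toNat false then s + PySem.List.pyGetD dp j 0 else s) 0) pvMOD

-- ===== PRECONDITION & SPEC =====
-- Pre_ excludes exactly the inputs on which A raises IndexError: dp[i^e] is out of range
-- as soon as some element e lies outside [-8192, 8192).
def Pre_primeXor (a : List Int) : Prop := ∀ e ∈ a, -8192 ≤ e ∧ e < 8192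
instance (a : List Int) : Decidable (Pre_primeXor a) := by unfold Pre_primeXor; infer_instance

def pvWitness_primeXor : List Int := [2, 3, 3]

def Spec_primeXor (a : List Int) (out : Int) : Prop := out = primeXor_alt a
instance (a : List Int) (out : Int) : Decidable (Spec_primeXor a out) := by unfold Spec_primeXor; infer_instance

-- ===== CLAIM (what is proved, stated in full; the proofs are below) =====
def Claim_equal_primeXor : Prop := ∀ (a : List Int), Dom_primeXor a → Pre_primeXor a → Spec_primeXor a (primeXor a)

-- ===== LEMMAS AND PROOFS =====

lemma pvTestBit_pow_add {n x j : Nat} (hx : x < 2^n) :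
    (2^n + x).testBit j = if j = n then true else x.testBit j := by
  rcases lt_trichotomy j n with h | h | h
  · have hsplit : 2^n + x = 2^j * 2^(n-j) + x := by
      have h12 : 2^j * 2^(n-j) = 2^n := by rw [← pow_add]; congr 1; omega
      omega
    have h2 : 2^(n-j) = 2 * 2^(n-j-1) := by
      rw [← pow_succ']; congr 1; omega
    simp only [Nat.testBit_eq_decide_div_mod_eq, if_neg (by omega : ¬ j = n), hsplit]
    rw [Nat.mul_add_div (Nat.two_pow_pos j), h2]
    rw [Nat.add_comm, Nat.add_mul_mod_self_left]
  · subst h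
    have h1 : (2^j + x) / 2^j = 1 := by
      rw [Nat.add_div_left _ (Nat.two_pow_pos j), Nat.div_eq_of_lt hx]
    simp [Nat.testBit_eq_decide_div_mod_eq, h1]
  · have h1 : (2^n + x).testBit j = false := by
      apply Nat.testBit_eq_false_of_lt
      calc 2^n + x < 2^n + 2^n := by omega
      _ = 2^(n+1) := by ring
      _ ≤ 2^j := Nat.pow_le_pow_right (by norm_num) (by omega)
    have h2 : x.testBit j = false :=
      Nat.testBit_eq_false_of_lt (lt_of_lt_of_le hx (Nat.pow_le_pow_right (by norm_num) (by omega)))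
    rw [h1, h2, if_neg (by omega)]

lemma pvXor_lt {n a b : Nat} (ha : a < 2^n) (hb : b < 2^n) : a ^^^ b < 2^n := by
  have := Nat.bitwise_lt_two_pow (f := bne) ha hb
  simpa [Nat.xor] using this

lemma pvTb_lo {n b : Nat} (hb : b < 2^n) : b.testBit n = false :=
  Nat.testBit_eq_false_of_lt hb

lemma pvXor_pow_add {n a b : Nat} (ha : a < 2^n) (hb : b < 2^n) :
    (2^n + a) ^^^ b = 2^n + (a ^^^ b) := by
  apply Nat.eq_of_testBit_eq
  intro j
  rw [Nat.testBit_xor, pvTestBit_pow_add ha, pvTestBit_pow_add (pvXor_lt ha hb)]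
  by_cases hj : j = n
  · subst hj; simp [pvTb_lo hb]
  · simp [hj, Nat.testBit_xor]

lemma pvXor_pow_add_pow_add {n a b : Nat} (ha : a < 2^n) (hb : b < 2^n) :
    (2^n + a) ^^^ (2^n + b) = a ^^^ b := by
  apply Nat.eq_of_testBit_eq
  intro j
  rw [Nat.testBit_xor, pvTestBit_pow_add ha, pvTestBit_pow_add hb]
  by_cases hj : j = n
  · subst hj; simp [pvTb_lo (pvXor_lt ha hb)]
  · simp [hj, Nat.testBit_xor]

lemma pvLand_lt {n a b : Nat} (ha : a < 2^n) : a &&& b < 2^n :=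
  lt_of_le_of_lt (Nat.and_le_left) ha

lemma pvLand_pow_add {n a b : Nat} (ha : a < 2^n) (hb : b < 2^n) :
    (2^n + a) &&& b = a &&& b := by
  apply Nat.eq_of_testBit_eq
  intro j
  rw [Nat.testBit_land, pvTestBit_pow_add ha, Nat.testBit_land]
  by_cases hj : j = n
  · subst hj; simp [pvTb_lo hb]
  · simp [hj]

lemma pvLand_pow_add_pow_add {n a b : Nat} (ha : a < 2^n) (hb : b < 2^n) :
    (2^n + a) &&& (2^n + b) = 2^n + (a &&& b) := by
  apply Nat.eq_of_testBit_eq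
  intro j
  rw [Nat.testBit_land, pvTestBit_pow_add ha, pvTestBit_pow_add hb,
      pvTestBit_pow_add (pvLand_lt ha (b := b)), Nat.testBit_land]
  by_cases hj : j = n
  · simp [hj]
  · simp [hj]

lemma pvXor_ones {n x : Nat} (hx : x < 2^n) : x ^^^ (2^n - 1) = 2^n - 1 - x := by
  induction n generalizing x with
  | zero => interval_cases x; rfl
  | succ n ih =>
    by_cases hlo : x < 2^n
    · have hsplit : 2^(n+1) - 1 = 2^n + (2^n - 1) := by
        have := Nat.two_pow_pos n; rw [pow_succ]; omega
      rw [hsplit, Nat.xor_comm, pvXor_pow_add (by have := Nat.two_pow_pos n; omega) hlo,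
          Nat.xor_comm, ih hlo]
      have := Nat.two_pow_pos n; omega
    · have hx' : x - 2^n < 2^n := by have := Nat.two_pow_pos n; rw [pow_succ] at hx; omega
      have hxe : x = 2^n + (x - 2^n) := by omega
      have hsplit : 2^(n+1) - 1 = 2^n + (2^n - 1) := by
        have := Nat.two_pow_pos n; rw [pow_succ]; omega
      rw [hxe, hsplit, pvXor_pow_add_pow_add hx' (by have := Nat.two_pow_pos n; omega),
          ih hx']
      omega

lemma pvLand_split {n a b : Nat} (ha : a < 2^n) (hb : b < 2^n) :
    (a &&& b) + (a &&& ((2^n - 1) ^^^ b)) = a := by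
  induction n generalizing a b with
  | zero => interval_cases a; interval_cases b; rfl
  | succ n ih =>
    have hp := Nat.two_pow_pos n
    have hsplit : 2^(n+1) - 1 = 2^n + (2^n - 1) := by rw [pow_succ]; omega
    have hmlt : 2^n - 1 < 2^n := by omega
    rcases Nat.lt_or_ge a (2^n) with halo | hahi
    · rcases Nat.lt_or_ge b (2^n) with hblo | hbhi
      · -- a,b low
        have hxb : (2^n + (2^n-1)) ^^^ b = 2^n + ((2^n-1) ^^^ b) := pvXor_pow_add hmlt hblo
        rw [hsplit, hxb, Nat.land_comm a (2^n + _), pvLand_pow_add (pvXor_lt hmlt hblo) halo,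
            Nat.land_comm _ a, ih halo hblo]
      · have hb' : b - 2^n < 2^n := by rw [pow_succ] at hb; omega
        have hbe : b = 2^n + (b - 2^n) := by omega
        rw [hsplit, hbe, Nat.land_comm a (2^n + _), pvLand_pow_add hb' halo,
            pvXor_pow_add_pow_add hmlt hb', Nat.land_comm _ a, ih halo hb']
    · have ha' : a - 2^n < 2^n := by rw [pow_succ] at ha; omega
      have hae : a = 2^n + (a - 2^n) := by omega
      rcases Nat.lt_or_ge b (2^n) with hblo | hbhi
      · have hxb : (2^n + (2^n-1)) ^^^ b = 2^n + ((2^n-1) ^^^ b) := pvXor_pow_add hmlt hblo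
        rw [hsplit, hae, pvLand_pow_add ha' hblo, hxb,
            pvLand_pow_add_pow_add ha' (pvXor_lt hmlt hblo)]
        have := ih ha' hblo
        omega
      · have hb' : b - 2^n < 2^n := by rw [pow_succ] at hb; omega
        have hbe : b = 2^n + (b - 2^n) := by omega
        rw [hsplit, hae, hbe, pvLand_pow_add_pow_add ha' hb',
            pvXor_pow_add_pow_add hmlt hb', pvLand_pow_add ha' (pvXor_lt hmlt hb')]
        have := ih ha' hb'
        omega


-- bitCount gains exactly one on adding a fresh top bit
lemma pvBitCount_split {x : Nat} :
    PySem.Int.bitCount (x : Int) = x % 2 + PySem.Int.bitCount ((x / 2 : Nat) : Int) := by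
  rcases Nat.eq_zero_or_pos x with h | h
  · subst h; simp [PySem.Int.bitCount_zero]
  · exact PySem.Int.bitCount_natCast h

lemma pvBitCount_pow_add {n x : Nat} (hx : x < 2^n) :
    PySem.Int.bitCount ((2^n + x : Nat) : Int) = PySem.Int.bitCount (x : Int) + 1 := by
  induction n generalizing x with
  | zero => interval_cases x; decide
  | succ n ih =>
    have h2 : 2^(n+1) = 2 * 2^n := by rw [pow_succ]; ring
    rw [pvBitCount_split (x := 2^(n+1) + x), pvBitCount_split (x := x)]
    have hmod : (2^(n+1) + x) % 2 = x % 2 := by omega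
    have hdiv : (2^(n+1) + x) / 2 = 2^n + x / 2 := by omega
    rw [hmod, hdiv, ih (by omega)]
    omega

lemma pvMod_small {e : Int} (h0 : 0 ≤ e) (h1 : e < 8192) : PySem.Int.mod e 8192 = e := by
  show e.fmod 8192 = e
  rw [Int.fmod_eq_emod_of_nonneg e (by norm_num)]; omega

lemma pvMod_negr {e : Int} (h0 : -8192 ≤ e) (h1 : e < 0) : PySem.Int.mod e 8192 = e + 8192 := by
  show e.fmod 8192 = e + 8192
  rw [Int.fmod_eq_emod_of_nonneg e (by norm_num)]; omega

lemma pvModHat_lt (e : Int) : (PySem.Int.mod e 8192).toNat < 8192 := by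
  show (e.fmod 8192).toNat < 8192
  rw [Int.fmod_eq_emod_of_nonneg e (by norm_num)]; omega

-- xs[i^e] for i = k in range(8192): resolves, under Pre_, to the entry at k ^^^ (e mod 8192)
lemma pvGetXor (dp : List Int) (hdp : dp.length = 8192) (k : Nat) (hk : k < 8192)
    (e : Int) (he0 : -8192 ≤ e) (he1 : e < 8192) :
    (PySem.List.pyGet? dp (PySem.Int.bxor (k : Int) e)).getD 0
      = dp.getD (k ^^^ (PySem.Int.mod e 8192).toNat) 0 := by
  have h13 : (8192 : Nat) = 2^13 := by norm_num
  by_cases hpos : 0 ≤ e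
  · have hx : PySem.Int.bxor (k : Int) e = ((k ^^^ e.toNat : Nat) : Int) := by
      conv_lhs => rw [← Int.toNat_of_nonneg hpos]
      rw [PySem.Int.bxor_natCast]
    have hlt : k ^^^ e.toNat < 8192 := by
      rw [h13] at hk ⊢; exact pvXor_lt hk (by rw [← h13]; omega)
    rw [hx, PySem.List.pyGet?_natCast, pvMod_small hpos he1, List.getD_eq_getElem?_getD]
  · rw [Int.not_le] at hpos
    set b : Nat := (-e - 1).toNat with hb
    have hbe : e = -(b : Int) - 1 := by omega
    have hblt : b < 8192 := by omega
    have hxlt : k ^^^ b < 8192 := by rw [h13] at hk hblt ⊢; exact pvXor_lt hk hblt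
    have hx : PySem.Int.bxor (k : Int) e = -((k ^^^ b : Nat) : Int) - 1 := by
      simp only [PySem.Int.bxor, Int.natCast_nonneg, if_true, if_neg (by omega : ¬ (0:Int) ≤ e)]
      simp
      omega
    have hx2 : PySem.Int.bxor (k : Int) e = -(((k ^^^ b) + 1 : Nat) : Int) := by
      rw [hx]; push_cast; ring
    rw [hx2, PySem.List.pyGet?_neg_natCast dp _ (by omega) (by omega)]
    have hmodv : (PySem.Int.mod e 8192).toNat = 8191 - b := by
      rw [pvMod_negr he0 hpos]; omega
    rw [hmodv, hdp]
    have h1 : 8191 - b = b ^^^ 8191 := by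
      have := pvXor_ones (n := 13) (x := b) (by rw [← h13]; omega)
      norm_num at this
      exact this.symm
    have h2 : k ^^^ (8191 - b) = 8192 - ((k ^^^ b) + 1) := by
      rw [h1, ← Nat.xor_assoc]
      have := pvXor_ones (n := 13) (x := k ^^^ b) (by rw [← h13]; omega)
      norm_num at this
      rw [this]
      have hgoal : ∀ X : Nat, X < 8192 → 8191 - X = 8192 - (X + 1) := by intro X hX; omega
      exact hgoal _ hxlt
    rw [h2, List.getD_eq_getElem?_getD]

-- k & e for k in range(8192): equals, under Pre_, k &&& (e mod 8192) as naturals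
lemma pvBandBridge (k : Nat) (hk : k < 8192) (e : Int) (he0 : -8192 ≤ e) (he1 : e < 8192) :
    PySem.Int.band (k : Int) e = ((k &&& (PySem.Int.mod e 8192).toNat : Nat) : Int) := by
  have h13 : (8192 : Nat) = 2^13 := by norm_num
  by_cases hpos : 0 ≤ e
  · conv_lhs => rw [← Int.toNat_of_nonneg hpos]
    rw [PySem.Int.band_natCast, pvMod_small hpos he1]
  · rw [Int.not_le] at hpos
    set b : Nat := (-e - 1).toNat with hb
    have hblt : b < 8192 := by omega
    have hx : PySem.Int.band (k : Int) e = ((k - (k &&& b) : Nat) : Int) := by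
      simp only [PySem.Int.band, Int.natCast_nonneg, if_true, if_neg (by omega : ¬ (0:Int) ≤ e)]
      simp
      have hbb : (-e).toNat - 1 = b := by omega
      rw [hbb]
    have hmodv : (PySem.Int.mod e 8192).toNat = 8191 - b := by
      rw [pvMod_negr he0 hpos]; omega
    have h1 : 8191 - b = b ^^^ 8191 := by
      have := pvXor_ones (n := 13) (x := b) (by rw [← h13]; omega)
      norm_num at this
      exact this.symm
    have hsplit := pvLand_split (n := 13) (a := k) (b := b) (by rw [← h13]; omega) (by rw [← h13]; omega)
    have h2 : k &&& (8191 - b) = k - (k &&& b) := by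
      rw [h1, Nat.xor_comm b 8191]
      norm_num at hsplit
      omega
    rw [hx, hmodv, h2]

-- ===== generic Walsh-Hadamard layer over a commutative ring =====

def pvWT {R : Type} [CommRing R] : Nat → List R → List R
  | 0, v => v
  | n+1, v =>
      List.zipWith (· + ·) (pvWT n (v.take (2^n))) (pvWT n (v.drop (2^n)))
        ++ List.zipWith (· - ·) (pvWT n (v.take (2^n))) (pvWT n (v.drop (2^n)))

def pvPerm {R : Type} [CommRing R] (n e : Nat) (v : List R) : List R :=
  (List.range (2^n)).map (fun i => v.getD (i ^^^ e) 0)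

def pvSgn (R : Type) [CommRing R] (n e : Nat) : List R :=
  (List.range (2^n)).map (fun k =>
    if PySem.Int.bitCount ((k &&& e : Nat) : Int) % 2 = 0 then (1 : R) else -1)

def pvDelta (R : Type) [CommRing R] (n : Nat) : List R := (1 : R) :: List.replicate (2^n - 1) 0

lemma pvWT_succ {R : Type} [CommRing R] {n : Nat} (v : List R) :
    pvWT (n+1) v
      = List.zipWith (· + ·) (pvWT n (v.take (2^n))) (pvWT n (v.drop (2^n)))
        ++ List.zipWith (· - ·) (pvWT n (v.take (2^n))) (pvWT n (v.drop (2^n))) := rfl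

lemma pvWT_append {R : Type} [CommRing R] {n : Nat} {X Y : List R}
    (hX : X.length = 2^n) :
    pvWT (n+1) (X ++ Y)
      = List.zipWith (· + ·) (pvWT n X) (pvWT n Y)
        ++ List.zipWith (· - ·) (pvWT n X) (pvWT n Y) := by
  rw [pvWT_succ, ← hX, List.take_left, List.drop_left]

lemma pvTakeLen {R : Type} {n : Nat} {v : List R} (hv : v.length = 2^(n+1)) :
    (v.take (2^n)).length = 2^n := by
  simp [List.length_take]; rw [pow_succ] at hv; omega

lemma pvDropLen {R : Type} {n : Nat} {v : List R} (hv : v.length = 2^(n+1)) :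
    (v.drop (2^n)).length = 2^n := by
  simp [List.length_drop]; rw [pow_succ] at hv; omega

lemma pvWT_length {R : Type} [CommRing R] {n : Nat} {v : List R} (hv : v.length = 2^n) :
    (pvWT n v).length = 2^n := by
  induction n generalizing v with
  | zero => simpa [pvWT]
  | succ n ih =>
    rw [pvWT_succ, List.length_append, List.length_zipWith, List.length_zipWith,
        ih (pvTakeLen hv), ih (pvDropLen hv), pow_succ]
    omega

-- pointwise recombination helpers
lemma pvZip4 {R : Type} [CommRing R] (f1 f2 f3 g1 g2 g3 : R → R → R)
    (h : ∀ a b c d, f1 (f2 a b) (f3 c d) = g1 (g2 a c) (g3 b d))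
    (A : List R) : ∀ (B C D : List R),
    List.zipWith f1 (List.zipWith f2 A B) (List.zipWith f3 C D)
      = List.zipWith g1 (List.zipWith g2 A C) (List.zipWith g3 B D) := by
  induction A with
  | nil => intro B C D; simp
  | cons x A ih =>
    intro B C D
    cases B with
    | nil => simp
    | cons y B =>
      cases C with
      | nil => simp
      | cons z C =>
        cases D with
        | nil => simp
        | cons t D => simp [ih, h]

lemma pvZip2 {R : Type} [CommRing R] (f1 f2 f3 : R → R → R) (g : R → R)
    (h : ∀ a b, f1 (f2 a b) (f3 a b) = g a)
    (A : List R) : ∀ (B : List R), A.length = B.length →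
    List.zipWith f1 (List.zipWith f2 A B) (List.zipWith f3 A B) = A.map g := by
  induction A with
  | nil => intro B _; simp
  | cons x A ih =>
    intro B hB
    cases B with
    | nil => simp at hB
    | cons y B => simp [ih B (by simpa using hB), h]

lemma pvZipExt {R : Type} (f g : R → R → R) (h : ∀ a b, f a b = g a b) (A B : List R) :
    List.zipWith f A B = List.zipWith g A B := by
  have : f = g := funext fun a => funext fun b => h a b
  rw [this]

lemma pvZip2' {R : Type} [CommRing R] (f1 f2 f3 : R → R → R) (g : R → R)
    (h : ∀ a b, f1 (f2 a b) (f3 a b) = g b)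
    (A : List R) : ∀ (B : List R), A.length = B.length →
    List.zipWith f1 (List.zipWith f2 A B) (List.zipWith f3 A B) = B.map g := by
  induction A with
  | nil => intro B hB; cases B; · simp
           · simp at hB
  | cons x A ih =>
    intro B hB
    cases B with
    | nil => simp at hB
    | cons y B => simp [ih B (by simpa using hB), h]

lemma pvWT_add {R : Type} [CommRing R] {n : Nat} {u w : List R}
    (hu : u.length = 2^n) (hw : w.length = 2^n) :
    pvWT n (List.zipWith (· + ·) u w)
      = List.zipWith (· + ·) (pvWT n u) (pvWT n w) := by
  induction n generalizing u w with
  | zero => simp [pvWT]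
  | succ n ih =>
    rw [pvWT_succ, pvWT_succ u, pvWT_succ w, List.take_zipWith, List.drop_zipWith,
        ih (pvTakeLen hu) (pvTakeLen hw), ih (pvDropLen hu) (pvDropLen hw),
        List.zipWith_append (by
          rw [List.length_zipWith, List.length_zipWith, pvWT_length (pvTakeLen hu),
              pvWT_length (pvTakeLen hw), pvWT_length (pvDropLen hu), pvWT_length (pvDropLen hw)])]
    congr 1
    · exact pvZip4 _ _ _ _ _ _ (by intro a b c d; ring) _ _ _ _
    · exact pvZip4 _ _ _ _ _ _ (by intro a b c d; ring) _ _ _ _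

lemma pvWT_sub {R : Type} [CommRing R] {n : Nat} {u w : List R}
    (hu : u.length = 2^n) (hw : w.length = 2^n) :
    pvWT n (List.zipWith (· - ·) u w)
      = List.zipWith (· - ·) (pvWT n u) (pvWT n w) := by
  induction n generalizing u w with
  | zero => simp [pvWT]
  | succ n ih =>
    rw [pvWT_succ, pvWT_succ u, pvWT_succ w, List.take_zipWith, List.drop_zipWith,
        ih (pvTakeLen hu) (pvTakeLen hw), ih (pvDropLen hu) (pvDropLen hw),
        List.zipWith_append (by
          rw [List.length_zipWith, List.length_zipWith, pvWT_length (pvTakeLen hu),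
              pvWT_length (pvTakeLen hw), pvWT_length (pvDropLen hu), pvWT_length (pvDropLen hw)])]
    congr 1
    · exact pvZip4 _ _ _ _ _ _ (by intro a b c d; ring) _ _ _ _
    · exact pvZip4 _ _ _ _ _ _ (by intro a b c d; ring) _ _ _ _

lemma pvWT_smul {R : Type} [CommRing R] {n : Nat} (c : R) {v : List R}
    (hv : v.length = 2^n) :
    pvWT n (v.map (fun x => c * x)) = (pvWT n v).map (fun x => c * x) := by
  induction n generalizing v with
  | zero => simp [pvWT]
  | succ n ih =>
    rw [pvWT_succ, pvWT_succ v, ← List.map_take, ← List.map_drop,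
        ih (pvTakeLen hv), ih (pvDropLen hv), List.map_append, List.map_zipWith,
        List.map_zipWith, List.zipWith_map_left, List.zipWith_map_left,
        List.zipWith_map_right, List.zipWith_map_right]
    congr 1
    · exact pvZipExt _ _ (by intro a b; ring) _ _
    · exact pvZipExt _ _ (by intro a b; ring) _ _

lemma pvWT_WT {R : Type} [CommRing R] {n : Nat} {v : List R} (hv : v.length = 2^n) :
    pvWT n (pvWT n v) = v.map (fun x => (2^n : R) * x) := by
  induction n generalizing v with
  | zero => simp [pvWT]
  | succ n ih =>
    have hA := pvWT_length (pvTakeLen hv)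
    have hB := pvWT_length (pvDropLen hv)
    rw [pvWT_succ v, pvWT_append (by rw [List.length_zipWith, hA, hB]; simp),
        pvWT_add hA hB, pvWT_sub hA hB, ih (pvTakeLen hv), ih (pvDropLen hv)]
    have h2A : List.zipWith (· + ·)
        (List.zipWith (· + ·) ((v.take (2^n)).map (fun x => (2^n : R) * x)) ((v.drop (2^n)).map (fun x => (2^n : R) * x)))
        (List.zipWith (· - ·) ((v.take (2^n)).map (fun x => (2^n : R) * x)) ((v.drop (2^n)).map (fun x => (2^n : R) * x)))
        = ((v.take (2^n)).map (fun x => (2^n : R) * x)).map (fun x => 2 * x) :=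
      pvZip2 _ _ _ _ (by intro a b; ring) _ _
        (by rw [List.length_map, List.length_map, List.length_take, List.length_drop, hv, pow_succ]; omega)
    have h2B : List.zipWith (· - ·)
        (List.zipWith (· + ·) ((v.take (2^n)).map (fun x => (2^n : R) * x)) ((v.drop (2^n)).map (fun x => (2^n : R) * x)))
        (List.zipWith (· - ·) ((v.take (2^n)).map (fun x => (2^n : R) * x)) ((v.drop (2^n)).map (fun x => (2^n : R) * x)))
        = ((v.drop (2^n)).map (fun x => (2^n : R) * x)).map (fun x => 2 * x) :=
      pvZip2' _ _ _ _ (by intro a b; ring) _ _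
        (by rw [List.length_map, List.length_map, List.length_take, List.length_drop, hv, pow_succ]; omega)
    rw [h2A, h2B, List.map_map, List.map_map, ← List.map_append, List.take_append_drop]
    apply List.map_congr_left
    intro x _
    simp only [Function.comp]
    rw [pow_succ]
    ring

-- perm and sgn split along the top bit
lemma pvPerm_append_lo {R : Type} [CommRing R] {n e : Nat} (he : e < 2^n)
    {a b : List R} (ha : a.length = 2^n) :
    pvPerm (n+1) e (a ++ b) = pvPerm n e a ++ pvPerm n e b := by
  unfold pvPerm
  rw [(by rw [pow_succ]; omega : 2^(n+1) = 2^n + 2^n), List.range_add, List.map_append,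
      List.map_map]
  congr 1
  · apply List.map_congr_left
    intro i hi
    rw [List.mem_range] at hi
    exact List.getD_append _ _ _ _ (by rw [ha]; exact pvXor_lt hi he)
  · apply List.map_congr_left
    intro i hi
    rw [List.mem_range] at hi
    simp only [Function.comp]
    rw [pvXor_pow_add hi he, List.getD_append_right _ _ _ _ (by rw [ha]; omega), ha,
        Nat.add_sub_cancel_left]

lemma pvPerm_append_hi {R : Type} [CommRing R] {n e : Nat} (he : e < 2^n)
    {a b : List R} (ha : a.length = 2^n) :
    pvPerm (n+1) (2^n + e) (a ++ b) = pvPerm n e b ++ pvPerm n e a := by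
  unfold pvPerm
  rw [(by rw [pow_succ]; omega : 2^(n+1) = 2^n + 2^n), List.range_add, List.map_append,
      List.map_map]
  congr 1
  · apply List.map_congr_left
    intro i hi
    rw [List.mem_range] at hi
    have hx : i ^^^ (2^n + e) = 2^n + (i ^^^ e) := by
      rw [Nat.xor_comm, pvXor_pow_add he hi, Nat.xor_comm e i]
    rw [hx, List.getD_append_right _ _ _ _ (by rw [ha]; omega), ha, Nat.add_sub_cancel_left]
  · apply List.map_congr_left
    intro i hi
    rw [List.mem_range] at hi
    simp only [Function.comp]
    rw [pvXor_pow_add_pow_add hi he]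
    exact List.getD_append _ _ _ _ (by rw [ha]; exact pvXor_lt hi he)

lemma pvSgn_append_lo {R : Type} [CommRing R] {n e : Nat} (he : e < 2^n) :
    pvSgn R (n+1) e = pvSgn R n e ++ pvSgn R n e := by
  unfold pvSgn
  rw [(by rw [pow_succ]; omega : 2^(n+1) = 2^n + 2^n), List.range_add, List.map_append,
      List.map_map]
  congr 1
  apply List.map_congr_left
  intro k hk
  rw [List.mem_range] at hk
  simp only [Function.comp]
  rw [pvLand_pow_add hk he]

lemma pvSgn_append_hi {R : Type} [CommRing R] {n e : Nat} (he : e < 2^n) :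
    pvSgn R (n+1) (2^n + e) = pvSgn R n e ++ (pvSgn R n e).map (fun s => -s) := by
  unfold pvSgn
  rw [(by rw [pow_succ]; omega : 2^(n+1) = 2^n + 2^n), List.range_add, List.map_append,
      List.map_map, List.map_map]
  congr 1
  · apply List.map_congr_left
    intro k hk
    rw [List.mem_range] at hk
    have h1 : k &&& (2^n + e) = k &&& e := by
      rw [Nat.land_comm, pvLand_pow_add he hk, Nat.land_comm]
    rw [h1]
  · apply List.map_congr_left
    intro k hk
    rw [List.mem_range] at hk
    simp only [Function.comp]
    rw [pvLand_pow_add_pow_add hk he, pvBitCount_pow_add (pvLand_lt hk)]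
    set c := PySem.Int.bitCount ((k &&& e : Nat) : Int) with hc
    rcases Nat.mod_two_eq_zero_or_one c with hpar | hpar
    · rw [if_neg (show ¬ (c + 1) % 2 = 0 by omega), if_pos hpar]
    · rw [if_pos (show (c + 1) % 2 = 0 by omega), if_neg (show ¬ c % 2 = 0 by omega), neg_neg]

lemma pvPerm_length {R : Type} [CommRing R] {n e : Nat} {v : List R} :
    (pvPerm n e v).length = 2^n := by simp [pvPerm]

lemma pvSgn_length {R : Type} [CommRing R] {n e : Nat} : (pvSgn R n e).length = 2^n := by
  simp [pvSgn]

lemma pvZip3 {R : Type} [CommRing R] (f1 f2 f3 g1 g2 : R → R → R)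
    (h : ∀ a b d, f1 (f2 a b) (f3 a d) = g1 a (g2 b d))
    (A : List R) : ∀ (B D : List R),
    List.zipWith f1 (List.zipWith f2 A B) (List.zipWith f3 A D)
      = List.zipWith g1 A (List.zipWith g2 B D) := by
  induction A with
  | nil => intro B D; simp
  | cons x A ih =>
    intro B D
    cases B with
    | nil => simp
    | cons y B =>
      cases D with
      | nil => simp
      | cons z D => simp [ih, h]

lemma pvWT_perm {R : Type} [CommRing R] {n e : Nat} (he : e < 2^n) {v : List R}
    (hv : v.length = 2^n) :
    pvWT n (pvPerm n e v) = List.zipWith (· * ·) (pvSgn R n e) (pvWT n v) := by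
  induction n generalizing e v with
  | zero =>
    have he0 : e = 0 := by simpa using he
    obtain ⟨x, rfl⟩ := List.length_eq_one_iff.mp (by simpa using hv)
    subst he0
    show pvPerm 0 0 [x] = List.zipWith (· * ·) (pvSgn R 0 0) [x]
    simp [pvPerm, pvSgn, PySem.Int.bitCount_zero]
  | succ n ih =>
    have hva : (v.take (2^n)).length = 2^n := pvTakeLen hv
    have hvb : (v.drop (2^n)).length = 2^n := pvDropLen hv
    have hWa := pvWT_length hva
    have hWb := pvWT_length hvb
    have hvsplit : v = v.take (2^n) ++ v.drop (2^n) := (List.take_append_drop _ v).symm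
    by_cases hlo : e < 2^n
    · conv_lhs => rw [hvsplit, pvPerm_append_lo hlo hva]
      rw [pvWT_append (by rw [pvPerm_length]), ih hlo hva, ih hlo hvb,
          pvSgn_append_lo hlo]
      conv_rhs => rw [hvsplit, pvWT_append hva,
          List.zipWith_append (by rw [pvSgn_length, List.length_zipWith, hWa, hWb]; omega)]
      congr 1
      · exact pvZip3 _ _ _ _ _ (by intro a b d; ring) _ _ _
      · exact pvZip3 _ _ _ _ _ (by intro a b d; ring) _ _ _
    · have he' : e - 2^n < 2^n := by rw [pow_succ] at he; omega
      have hee : e = 2^n + (e - 2^n) := by omega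
      rw [hee]
      conv_lhs => rw [hvsplit, pvPerm_append_hi he' hva]
      rw [pvWT_append (by rw [pvPerm_length]), ih he' hvb, ih he' hva,
          pvSgn_append_hi he']
      conv_rhs => rw [hvsplit, pvWT_append hva,
          List.zipWith_append (by rw [pvSgn_length, List.length_zipWith, hWa, hWb]; omega)]
      congr 1
      · have h0 : List.zipWith (· + ·) (pvWT n (v.take (2^n))) (pvWT n (v.drop (2^n)))
            = List.zipWith (fun b a => a + b) (pvWT n (v.drop (2^n))) (pvWT n (v.take (2^n))) :=
          List.zipWith_comm
        rw [h0]
        exact pvZip3 _ _ _ _ _ (by intro a b d; ring) _ _ _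
      · rw [List.zipWith_map_left]
        have h1 : List.zipWith (· - ·) (pvWT n (v.take (2^n))) (pvWT n (v.drop (2^n)))
            = List.zipWith (fun b a => a - b) (pvWT n (v.drop (2^n))) (pvWT n (v.take (2^n))) :=
          List.zipWith_comm
        rw [h1]
        exact pvZip3 _ _ _ _ _ (by intro a b d; ring) _ _ _

def pvGConv {R : Type} [CommRing R] (n e : Nat) (ev od : R) (v : List R) : List R :=
  List.zipWith (· + ·) (v.map (fun x => ev * x)) ((pvPerm n e v).map (fun x => od * x))

def pvGFct (R : Type) [CommRing R] (n e : Nat) (ev od : R) : List R :=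
  (pvSgn R n e).map (fun s => ev + od * s)

lemma pvGConv_length {R : Type} [CommRing R] {n e : Nat} {ev od : R} {v : List R}
    (hv : v.length = 2^n) : (pvGConv n e ev od v).length = 2^n := by
  simp [pvGConv, pvPerm_length, hv]

lemma pvZipSW {R : Type} [CommRing R] (f gIn g : R → R → R)
    (h : ∀ s w, f w (gIn s w) = g s w)
    (S : List R) : ∀ (W : List R),
    List.zipWith f W (List.zipWith gIn S W) = List.zipWith g S W := by
  induction S with
  | nil => intro W; simp
  | cons s S ih =>
    intro W
    cases W with
    | nil => simp
    | cons w W => simp [ih, h]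

lemma pvWT_gconv {R : Type} [CommRing R] {n e : Nat} (he : e < 2^n) {ev od : R}
    {v : List R} (hv : v.length = 2^n) :
    pvWT n (pvGConv n e ev od v)
      = List.zipWith (· * ·) (pvGFct R n e ev od) (pvWT n v) := by
  rw [pvGConv, pvWT_add (by simp [hv]) (by simp [pvPerm_length]),
      pvWT_smul ev hv, pvWT_smul od (pvPerm_length (e := e)), pvWT_perm he hv,
      pvGFct, List.zipWith_map_left, List.zipWith_map_right, List.zipWith_map_left]
  exact pvZipSW _ _ _ (by intro s w; ring) _ _

def pvT {R : Type} [CommRing R] (n : Nat) (zinv : R) (F : List R) : List R :=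
  (pvWT n F).map (fun x => zinv * x)

lemma pvT_length {R : Type} [CommRing R] {n : Nat} {zinv : R} {F : List R}
    (hF : F.length = 2^n) : (pvT n zinv F).length = 2^n := by
  simp [pvT, pvWT_length hF]

lemma pvWT_T {R : Type} [CommRing R] {n : Nat} {zinv : R} (hinv : zinv * 2^n = 1)
    {F : List R} (hF : F.length = 2^n) : pvWT n (pvT n zinv F) = F := by
  rw [pvT, pvWT_smul zinv (pvWT_length hF), pvWT_WT hF, List.map_map]
  have : ∀ x ∈ F, ((fun x => zinv * x) ∘ (fun x => (2^n : R) * x)) x = id x := by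
    intro x _
    simp only [Function.comp, id]
    rw [← mul_assoc, hinv, one_mul]
  rw [List.map_congr_left this, List.map_id]

lemma pvT_WT {R : Type} [CommRing R] {n : Nat} {zinv : R} (hinv : zinv * 2^n = 1)
    {v : List R} (hv : v.length = 2^n) : pvT n zinv (pvWT n v) = v := by
  rw [pvT, pvWT_WT hv, List.map_map]
  have : ∀ x ∈ v, ((fun x => zinv * x) ∘ (fun x => (2^n : R) * x)) x = id x := by
    intro x _
    simp only [Function.comp, id]
    rw [← mul_assoc, hinv, one_mul]
  rw [List.map_congr_left this, List.map_id]

lemma pvWT_inj {R : Type} [CommRing R] {n : Nat} {zinv : R} (hinv : zinv * 2^n = 1)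
    {u v : List R} (hu : u.length = 2^n) (hv : v.length = 2^n)
    (h : pvWT n u = pvWT n v) : u = v := by
  rw [← pvT_WT hinv hu, h, pvT_WT hinv hv]

lemma pvT_mul_fct {R : Type} [CommRing R] {n e : Nat} (he : e < 2^n) {zinv ev od : R}
    (hinv : zinv * 2^n = 1) {F : List R} (hF : F.length = 2^n) :
    pvT n zinv (List.zipWith (· * ·) (pvGFct R n e ev od) F)
      = pvGConv n e ev od (pvT n zinv F) := by
  have hzf : (List.zipWith (· * ·) (pvGFct R n e ev od) F).length = 2^n := by
    rw [List.length_zipWith, pvGFct, List.length_map, pvSgn_length, hF]; omega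
  apply pvWT_inj hinv (pvT_length hzf) (pvGConv_length (pvT_length hF))
  rw [pvWT_T hinv hzf, pvWT_gconv he (pvT_length hF), pvWT_T hinv hF]

lemma pvWT_zeros {R : Type} [CommRing R] {n : Nat} :
    pvWT n (List.replicate (2^n) (0 : R)) = List.replicate (2^n) 0 := by
  induction n with
  | zero => simp [pvWT]
  | succ n ih =>
    have hsplit : List.replicate (2^(n+1)) (0 : R)
        = List.replicate (2^n) 0 ++ List.replicate (2^n) 0 := by
      rw [← List.replicate_add]; congr 1; rw [pow_succ]; omega
    rw [hsplit, pvWT_append (by simp), ih, List.zipWith_replicate, List.zipWith_replicate]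
    simp only [min_self, add_zero, sub_zero]

lemma pvDelta_length {R : Type} [CommRing R] {n : Nat} : (pvDelta R n).length = 2^n := by
  have := Nat.two_pow_pos n
  simp [pvDelta]; omega

lemma pvWT_delta {R : Type} [CommRing R] {n : Nat} :
    pvWT n (pvDelta R n) = List.replicate (2^n) 1 := by
  induction n with
  | zero => simp [pvWT, pvDelta]
  | succ n ih =>
    have hsplit : pvDelta R (n+1) = pvDelta R n ++ List.replicate (2^n) 0 := by
      show (1 : R) :: List.replicate (2^(n+1) - 1) 0 = _
      have h1 : 2^(n+1) - 1 = (2^n - 1) + 2^n := by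
        have := Nat.two_pow_pos n; rw [pow_succ]; omega
      rw [h1, List.replicate_add, pvDelta, List.cons_append]
    rw [hsplit, pvWT_append pvDelta_length, ih, pvWT_zeros, List.zipWith_replicate,
        List.zipWith_replicate]
    have h2 : 2^(n+1) = 2^n + 2^n := by rw [pow_succ]; omega
    rw [h2, List.replicate_add]
    simp

lemma pvT_ones {R : Type} [CommRing R] {n : Nat} {zinv : R} (hinv : zinv * 2^n = 1) :
    pvT n zinv (List.replicate (2^n) (1 : R)) = pvDelta R n := by
  rw [← pvWT_delta, pvT_WT hinv pvDelta_length]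

lemma pvFoldBridge {R : Type} [CommRing R] {n : Nat} {zinv : R} (hinv : zinv * 2^n = 1) :
    ∀ (L : List (Nat × R × R)), (∀ t ∈ L, t.1 < 2^n) → ∀ (F : List R), F.length = 2^n →
    L.foldl (fun v t => pvGConv n t.1 t.2.1 t.2.2 v) (pvT n zinv F)
      = pvT n zinv (L.foldl (fun G t => List.zipWith (· * ·) (pvGFct R n t.1 t.2.1 t.2.2) G) F) := by
  intro L
  induction L with
  | nil => intro _ F _; simp
  | cons t L ih =>
    intro hL F hF
    have ht : t.1 < 2^n := hL t List.mem_cons_self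
    have hzf : (List.zipWith (· * ·) (pvGFct R n t.1 t.2.1 t.2.2) F).length = 2^n := by
      rw [List.length_zipWith, pvGFct, List.length_map, pvSgn_length, hF]; omega
    rw [List.foldl_cons, List.foldl_cons, ← pvT_mul_fct ht hinv hF,
        ih (fun u hu => hL u (List.mem_cons_of_mem t hu)) _ hzf]

-- ===== port-bridging layer =====

def pvZ (l : List Int) : List (ZMod 1000000007) := l.map Int.cast

lemma pvCastMod (a : Int) :
    ((PySem.Int.mod a pvMOD : Int) : ZMod 1000000007) = (a : ZMod 1000000007) := by
  show ((a.fmod pvMOD : Int) : ZMod 1000000007) = _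
  rw [Int.fmod_eq_emod_of_nonneg a (by norm_num [pvMOD])]
  have := ZMod.intCast_mod a 1000000007
  norm_num at this ⊢
  show ((a % (1000000007 : Int) : Int) : ZMod 1000000007) = _
  exact_mod_cast this

lemma pvZ_length (l : List Int) : (pvZ l).length = l.length := by simp [pvZ]

lemma pvZ_getD (l : List Int) (j : Nat) (hj : j < l.length) :
    (pvZ l).getD j 0 = ((l.getD j 0 : Int) : ZMod 1000000007) := by
  rw [List.getD_eq_getElem _ _ (by rw [pvZ_length]; exact hj), List.getD_eq_getElem _ _ hj]
  simp [pvZ]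

lemma pvListEqMapRange (l : List (ZMod 1000000007)) {N : Nat} (h : l.length = N) :
    l = (List.range N).map (fun k => l.getD k 0) := by
  apply List.ext_getElem
  · simp [h]
  · intro i h1 h2
    simp [List.getElem?_eq_getElem h1]

lemma pvZipSame {α β : Type} (g : α → α → β) (l : List α) :
    List.zipWith g l l = l.map (fun x => g x x) := by
  induction l with
  | nil => rfl
  | cons x t ih => simp

lemma pvRange8192 : PySem.List.pyRange 0 8192 1 = (List.range 8192).map (fun k => ((k : Nat) : Int)) := by
  have h : ((8192 : Int) - 0).toNat = 8192 := by decide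
  rw [PySem.List.pyRange_one, h]
  simp

lemma pvParityBridge (c : Nat) :
    PySem.Int.mod ((c : Nat) : Int) 2 = 0 ↔ c % 2 = 0 := by
  show ((c : Int)).fmod 2 = 0 ↔ _
  rw [Int.fmod_eq_emod_of_nonneg _ (by norm_num)]
  omega

lemma pvConvA_length (dp : List Int) (e ev od : Int) : (pvConvA dp e ev od).length = 8192 := by
  simp [pvConvA, PySem.List.length_pyRange_one]

lemma pvFactB_length (F : List Int) (e ev od : Int) : (pvFactB F e ev od).length = 8192 := by
  simp [pvFactB, PySem.List.length_pyRange_one]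

lemma pvMapRangeCollapse {α : Type} (f1 f2 : Nat → ZMod 1000000007) (g : ZMod 1000000007 → ZMod 1000000007 → α) (N : Nat) :
    List.zipWith g ((List.range N).map f1) ((List.range N).map f2)
      = (List.range N).map (fun k => g (f1 k) (f2 k)) := by
  rw [List.zipWith_map_left, List.zipWith_map_right, pvZipSame]

lemma pvGConv_eq_map {n e : Nat} {ev od : ZMod 1000000007} {v : List (ZMod 1000000007)}
    (hv : v.length = 2^n) :
    pvGConv n e ev od v
      = (List.range (2^n)).map (fun k => ev * v.getD k 0 + od * v.getD (k ^^^ e) 0) := by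
  have hmap : v.map (fun x => ev * x) = (List.range (2^n)).map (fun k => ev * v.getD k 0) := by
    conv_lhs => rw [pvListEqMapRange v hv]
    rw [List.map_map]
    rfl
  have hperm : (pvPerm n e v).map (fun x => od * x)
      = (List.range (2^n)).map (fun k => od * v.getD (k ^^^ e) 0) := by
    rw [pvPerm, List.map_map]
    rfl
  rw [pvGConv, hmap, hperm, pvMapRangeCollapse]

lemma pvGFct_mul_eq_map {n e : Nat} {ev od : ZMod 1000000007} {F : List (ZMod 1000000007)}
    (hF : F.length = 2^n) :
    List.zipWith (· * ·) (pvGFct (ZMod 1000000007) n e ev od) F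
      = (List.range (2^n)).map (fun k =>
          (ev + od * (if PySem.Int.bitCount ((k &&& e : Nat) : Int) % 2 = 0 then 1 else -1)) * F.getD k 0) := by
  have hfct : pvGFct (ZMod 1000000007) n e ev od
      = (List.range (2^n)).map (fun k =>
          ev + od * (if PySem.Int.bitCount ((k &&& e : Nat) : Int) % 2 = 0 then 1 else -1)) := by
    rw [pvGFct, pvSgn, List.map_map]
    rfl
  conv_lhs => rw [hfct, pvListEqMapRange F hF]
  rw [pvMapRangeCollapse]

lemma pvConvA_bridge (dp : List Int) (hdp : dp.length = 8192) (e ev od : Int)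
    (he0 : -8192 ≤ e) (he1 : e < 8192) :
    pvZ (pvConvA dp e ev od)
      = pvGConv 13 (PySem.Int.mod e 8192).toNat (ev : ZMod 1000000007) (od : ZMod 1000000007)
          (pvZ dp) := by
  have hêlt : (PySem.Int.mod e 8192).toNat < 8192 := pvModHat_lt e
  have hzlen : (pvZ dp).length = 2^13 := by rw [pvZ_length, hdp]; norm_num
  rw [pvGConv_eq_map hzlen, pvConvA, pvZ, pvRange8192, List.map_map, List.map_map]
  have h13 : (2:Nat)^13 = 8192 := by norm_num
  rw [h13]
  apply List.map_congr_left
  intro k hk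
  rw [List.mem_range] at hk
  have hêlt2 : (PySem.Int.mod e 8192).toNat < 8192 := pvModHat_lt e
  have hxor : k ^^^ (PySem.Int.mod e 8192).toNat < 8192 := by
    have h2 := pvXor_lt (n := 13) (a := k) (b := (PySem.Int.mod e 8192).toNat)
      (by rw [h13]; omega) (by rw [h13]; omega)
    rw [h13] at h2
    exact h2
  simp only [Function.comp]
  rw [pvCastMod, PySem.List.pyGetD_natCast, pvGetXor dp hdp k hk e he0 he1,
      pvZ_getD dp k (by omega), pvZ_getD dp _ (by omega)]
  push_cast
  ring

lemma pvFactB_bridge (F : List Int) (hF : F.length = 8192) (e ev od : Int)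
    (he0 : -8192 ≤ e) (he1 : e < 8192) :
    pvZ (pvFactB F e ev od)
      = List.zipWith (· * ·)
          (pvGFct (ZMod 1000000007) 13 (PySem.Int.mod e 8192).toNat (ev : ZMod 1000000007) (od : ZMod 1000000007))
          (pvZ F) := by
  have hzlen : (pvZ F).length = 2^13 := by rw [pvZ_length, hF]; norm_num
  rw [pvGFct_mul_eq_map hzlen, pvFactB, pvZ, pvRange8192, List.map_map, List.map_map]
  have h13 : (2:Nat)^13 = 8192 := by norm_num
  rw [h13]
  apply List.map_congr_left
  intro k hk
  rw [List.mem_range] at hk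
  simp only [Function.comp]
  rw [pvCastMod, PySem.List.pyGetD_natCast, pvZ_getD F k (by omega)]
  rw [pvBandBridge k hk e he0 he1]
  by_cases hpar : PySem.Int.bitCount ((k &&& (PySem.Int.mod e 8192).toNat : Nat) : Int) % 2 = 0
  · rw [if_pos ((pvParityBridge _).mpr hpar), if_pos hpar]
    push_cast
    rw [pvCastMod]
    push_cast
    ring
  · rw [if_neg (fun hc => hpar ((pvParityBridge _).mp hc)), if_neg hpar]
    push_cast
    rw [pvCastMod]
    push_cast
    ring

lemma pvZipCastAdd (A B : List Int) :
    List.zipWith (fun x y => ((x : Int) : ZMod 1000000007) + ((y : Int) : ZMod 1000000007)) A B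
      = List.zipWith (· + ·) (pvZ A) (pvZ B) := by
  rw [pvZ, pvZ, List.zipWith_map_left, List.zipWith_map_right]

lemma pvZipCastSub (A B : List Int) :
    List.zipWith (fun x y => ((x : Int) : ZMod 1000000007) - ((y : Int) : ZMod 1000000007)) A B
      = List.zipWith (· - ·) (pvZ A) (pvZ B) := by
  rw [pvZ, pvZ, List.zipWith_map_left, List.zipWith_map_right]

lemma pvIwhtAux_bridge : ∀ (n : Nat), ∀ (fuel : Nat), n ≤ fuel → ∀ (F : List Int), F.length = 2^n →
    pvZ (pvIwhtAux fuel F) = pvWT n (pvZ F) := by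
  intro n
  induction n with
  | zero =>
    intro fuel _ F hF
    have h1 : F.length ≤ 1 := by rw [hF]; norm_num
    cases fuel with
    | zero => simp [pvIwhtAux, pvWT]
    | succ f => simp [pvIwhtAux, h1, pvWT]
  | succ n ih =>
    intro fuel hfuel F hF
    obtain ⟨f, rfl⟩ : ∃ f, fuel = f + 1 := ⟨fuel - 1, by omega⟩
    have hp := Nat.two_pow_pos n
    have hlen2 : ¬ F.length ≤ 1 := by rw [hF, pow_succ]; omega
    have hm : F.length / 2 = 2^n := by rw [hF, pow_succ]; omega
    have htake : (F.take (F.length / 2)).length = 2^n := by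
      rw [List.length_take, hm, hF, pow_succ]; omega
    have hdrop : (F.drop (F.length / 2)).length = 2^n := by
      rw [List.length_drop, hm, hF, pow_succ]; omega
    show pvZ (if F.length ≤ 1 then F else _) = _
    rw [if_neg hlen2]
    have hfun : (fun x y : Int => ((PySem.Int.mod (x + y) pvMOD : Int) : ZMod 1000000007))
        = fun x y : Int => ((x : Int) : ZMod 1000000007) + ((y : Int) : ZMod 1000000007) := by
      funext x y
      rw [pvCastMod]
      push_cast
      ring
    have hfun2 : (fun x y : Int => ((PySem.Int.mod (x - y) pvMOD : Int) : ZMod 1000000007))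
        = fun x y : Int => ((x : Int) : ZMod 1000000007) - ((y : Int) : ZMod 1000000007) := by
      funext x y
      rw [pvCastMod]
      push_cast
      ring
    rw [pvZ, List.map_append, List.map_zipWith, List.map_zipWith]
    show List.zipWith _ _ _ ++ List.zipWith _ _ _ = _
    rw [hfun, hfun2, pvZipCastAdd, pvZipCastSub]
    rw [ih f (by omega) _ htake, ih f (by omega) _ hdrop, pvWT_succ (pvZ F)]
    simp only [pvZ]
    rw [List.map_take, List.map_drop, hm]

lemma pvIwht_bridge (n : Nat) (F : List Int) (hF : F.length = 2^n) :
    pvZ (pvIwht F) = pvWT n (pvZ F) := by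
  rw [pvIwht]
  refine pvIwhtAux_bridge n F.length ?_ F hF
  rw [hF]
  exact Nat.le_of_lt Nat.lt_two_pow_self

set_option maxRecDepth 10000 in
lemma pvInvFact :
    ((pvPowMod 8192 (pvMOD - 2).toNat pvMOD : Int) : ZMod 1000000007) * ((2:ZMod 1000000007)^13) = 1 := by
  have h : PySem.Int.mod ((pvPowMod 8192 (pvMOD - 2).toNat pvMOD) * 8192) pvMOD = 1 := by decide
  have h2 := congrArg (fun z : Int => ((z : Int) : ZMod 1000000007)) h
  simp only at h2
  rw [pvCastMod] at h2
  push_cast at h2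
  have h3 : (8192 : ZMod 1000000007) = (2:ZMod 1000000007)^13 := by norm_num
  rw [← h3]
  exact h2

lemma pvAFold_len (evf odf : Int → Int) :
    ∀ (L : List Int) (dp : List Int), dp.length = 8192 →
    (L.foldl (fun dp e => pvConvA dp e (evf e) (odf e)) dp).length = 8192 := by
  intro L
  induction L with
  | nil => intro dp h; exact h
  | cons e L ih => intro dp h; exact ih _ (pvConvA_length _ _ _ _)

lemma pvBFold_len (evf odf : Int → Int) :
    ∀ (L : List Int) (F : List Int), F.length = 8192 →
    (L.foldl (fun F e => pvFactB F e (evf e) (odf e)) F).length = 8192 := by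
  intro L
  induction L with
  | nil => intro F h; exact h
  | cons e L ih => intro F h; exact ih _ (pvFactB_length _ _ _ _)

lemma pvAFold_bridge (evf odf : Int → Int) :
    ∀ (L : List Int), (∀ e ∈ L, -8192 ≤ e ∧ e < 8192) → ∀ (dp : List Int), dp.length = 8192 →
    pvZ (L.foldl (fun dp e => pvConvA dp e (evf e) (odf e)) dp)
      = L.foldl (fun v e => pvGConv 13 (PySem.Int.mod e 8192).toNat
          ((evf e : Int) : ZMod 1000000007) ((odf e : Int) : ZMod 1000000007) v) (pvZ dp) := by
  intro L
  induction L with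
  | nil => intro _ dp _; rfl
  | cons e L ih =>
    intro hb dp hdp
    have he := hb e List.mem_cons_self
    rw [List.foldl_cons, List.foldl_cons,
        ih (fun u hu => hb u (List.mem_cons_of_mem e hu)) _ (pvConvA_length _ _ _ _),
        pvConvA_bridge dp hdp e _ _ he.1 he.2]

lemma pvBFold_bridge (evf odf : Int → Int) :
    ∀ (L : List Int), (∀ e ∈ L, -8192 ≤ e ∧ e < 8192) → ∀ (F : List Int), F.length = 8192 →
    pvZ (L.foldl (fun F e => pvFactB F e (evf e) (odf e)) F)
      = L.foldl (fun G e => List.zipWith (· * ·)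
          (pvGFct (ZMod 1000000007) 13 (PySem.Int.mod e 8192).toNat
            ((evf e : Int) : ZMod 1000000007) ((odf e : Int) : ZMod 1000000007)) G) (pvZ F) := by
  intro L
  induction L with
  | nil => intro _ F _; rfl
  | cons e L ih =>
    intro hb F hF
    have he := hb e List.mem_cons_self
    rw [List.foldl_cons, List.foldl_cons,
        ih (fun u hu => hb u (List.mem_cons_of_mem e hu)) _ (pvFactB_length _ _ _ _),
        pvFactB_bridge F hF e _ _ he.1 he.2]

lemma pvDp0 : pvZ ((List.replicate 8192 (0:Int)).set 0 1) = pvDelta (ZMod 1000000007) 13 := by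
  rw [(by norm_num : (8192:Nat) = 8191+1), List.replicate_succ, List.set_cons_zero, pvZ,
      pvDelta, (by norm_num : (2:Nat)^13 - 1 = 8191), List.map_cons, List.map_replicate]
  norm_num

lemma pvOnes : pvZ (List.replicate 8192 (1:Int)) = List.replicate (2^13) (1 : ZMod 1000000007) := by
  rw [pvZ, List.map_replicate, (by norm_num : (2:Nat)^13 = 8192)]
  norm_num

lemma pvGetDCongr {dpA dpB : List Int} (h : pvZ dpA = pvZ dpB)
    (hA : dpA.length = 8192) (hB : dpB.length = 8192) (k : Nat) (hk : k < 8192) :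
    ((dpA.getD k 0 : Int) : ZMod 1000000007) = ((dpB.getD k 0 : Int) : ZMod 1000000007) := by
  rw [← pvZ_getD dpA k (by omega), ← pvZ_getD dpB k (by omega), h]

lemma pvSumFold_bridge {dpA dpB : List Int} (h : pvZ dpA = pvZ dpB)
    (hA : dpA.length = 8192) (hB : dpB.length = 8192) (pr : List Bool) :
    ∀ (idx : List Int), (∀ j ∈ idx, 0 ≤ j ∧ j < 8192) → ∀ (c1 c2 : Int),
    ((c1 : Int) : ZMod 1000000007) = ((c2 : Int) : ZMod 1000000007) →
    ((idx.foldl (fun count j =>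
        if pr.getD j.toNat false then
          if count + PySem.List.pyGetD dpA j 0 > pvMOD then
            PySem.Int.mod (count + PySem.List.pyGetD dpA j 0) pvMOD
          else count + PySem.List.pyGetD dpA j 0
        else count) c1 : Int) : ZMod 1000000007)
      = ((idx.foldl (fun s j =>
          if pr.getD j.toNat false then s + PySem.List.pyGetD dpB j 0 else s) c2 : Int) : ZMod 1000000007) := by
  intro idx
  induction idx with
  | nil => intro _ c1 c2 hc; exact hc
  | cons j idx ih =>
    intro hj c1 c2 hc
    have hjb := hj j List.mem_cons_self
    have hget : ((PySem.List.pyGetD dpA j 0 : Int) : ZMod 1000000007)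
        = ((PySem.List.pyGetD dpB j 0 : Int) : ZMod 1000000007) := by
      rw [PySem.List.pyGetD_eq_getElem dpA 0 hjb.1 (by rw [hA]; exact_mod_cast hjb.2),
          PySem.List.pyGetD_eq_getElem dpB 0 hjb.1 (by rw [hB]; exact_mod_cast hjb.2)]
      rw [← List.getD_eq_getElem dpA 0 (by omega : j.toNat < dpA.length),
          ← List.getD_eq_getElem dpB 0 (by omega : j.toNat < dpB.length)]
      exact pvGetDCongr h hA hB j.toNat (by omega)
    rw [List.foldl_cons, List.foldl_cons]
    apply ih (fun u hu => hj u (List.mem_cons_of_mem j hu))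
    by_cases hp : pr.getD j.toNat false
    · rw [if_pos hp, if_pos hp]
      by_cases hbig : c1 + PySem.List.pyGetD dpA j 0 > pvMOD
      · rw [if_pos hbig, pvCastMod]
        push_cast
        rw [hc, hget]
      · rw [if_neg hbig]
        push_cast
        rw [hc, hget]
    · rw [if_neg hp, if_neg hp]
      exact hc

lemma pvModRange (x : Int) : 0 ≤ PySem.Int.mod x pvMOD ∧ PySem.Int.mod x pvMOD < pvMOD := by
  show 0 ≤ x.fmod pvMOD ∧ x.fmod pvMOD < pvMOD
  rw [Int.fmod_eq_emod_of_nonneg x (by norm_num [pvMOD])]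
  constructor
  · exact Int.emod_nonneg x (by norm_num [pvMOD])
  · exact Int.emod_lt_of_pos x (by norm_num [pvMOD])

lemma pvIntCastInj {x y : Int} (hx0 : 0 ≤ x) (hx1 : x < pvMOD) (hy0 : 0 ≤ y) (hy1 : y < pvMOD)
    (h : ((x : Int) : ZMod 1000000007) = y) : x = y := by
  have h2 := (ZMod.intCast_eq_intCast_iff x y 1000000007).mp h
  have h3 : x % (1000000007 : Int) = y % (1000000007 : Int) := h2
  have hm : pvMOD = (1000000007 : Int) := rfl
  rw [hm] at hx1 hy1
  omega

theorem pvMain (a : List Int) (hpre : Pre_primeXor a) : primeXor a = primeXor_alt a := by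
  have hkeys : ∀ e ∈ (PySem.Dict.counter a).keys, -8192 ≤ e ∧ e < 8192 := by
    intro e he
    rw [PySem.Dict.keys_counter, PySem.Set.mem_ofList] at he
    exact hpre e he
  set evf : Int → Int := fun e => PySem.Int.floordiv ((PySem.Dict.counter a).getD e 0) 2 + 1 with hevf
  set odf : Int → Int := fun e => PySem.Int.floordiv ((PySem.Dict.counter a).getD e 0 + 1) 2 with hodf
  set L := (PySem.Dict.counter a).keys with hL
  set dpA := L.foldl (fun dp e => pvConvA dp e (evf e) (odf e))
      ((List.replicate 8192 (0:Int)).set 0 1) with hdpA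
  set FB := L.foldl (fun F e => pvFactB F e (evf e) (odf e)) (List.replicate 8192 (1:Int)) with hFB
  set invM := pvPowMod 8192 (pvMOD - 2).toNat pvMOD with hinvM
  set dpB := (pvIwht FB).map (fun x => PySem.Int.mod (x * invM) pvMOD) with hdpB
  have hdpA_len : dpA.length = 8192 :=
    pvAFold_len _ _ _ _ (by rw [List.length_set, List.length_replicate])
  have hFB_len : FB.length = 8192 := pvBFold_len _ _ _ _ (by rw [List.length_replicate])
  have hinv : ((invM : Int) : ZMod 1000000007) * (2:ZMod 1000000007)^13 = 1 := pvInvFact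
  -- ZMod-level equality of the two dp tables
  have hZB : pvZ dpB = pvT 13 ((invM : Int) : ZMod 1000000007) (pvZ FB) := by
    rw [hdpB, pvZ, List.map_map, pvT]
    have hf : (Int.cast ∘ fun x => PySem.Int.mod (x * invM) pvMOD)
        = (fun x : Int => ((invM : Int) : ZMod 1000000007) * ((x : Int) : ZMod 1000000007)) := by
      funext x
      simp only [Function.comp]
      rw [pvCastMod]
      push_cast
      ring
    rw [hf]
    have : List.map (fun x : Int => ((invM : Int) : ZMod 1000000007) * ((x : Int) : ZMod 1000000007)) (pvIwht FB)
        = List.map (fun y => ((invM : Int) : ZMod 1000000007) * y) (List.map Int.cast (pvIwht FB)) := by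
      rw [List.map_map]
      rfl
    rw [this]
    have hWb : List.map Int.cast (pvIwht FB) = pvWT 13 (pvZ FB) :=
      pvIwht_bridge 13 FB (by rw [hFB_len]; norm_num)
    rw [hWb]
  have hzeq : pvZ dpA = pvZ dpB := by
    rw [hdpA, pvAFold_bridge evf odf L hkeys _ (by rw [List.length_set, List.length_replicate]), pvDp0]
    rw [hZB, hFB, pvBFold_bridge evf odf L hkeys _ (by rw [List.length_replicate]), pvOnes]
    have hones_len : (List.replicate (2^13) (1 : ZMod 1000000007)).length = 2^13 :=
      List.length_replicate
    have hdelta : pvDelta (ZMod 1000000007) 13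
        = pvT 13 ((invM : Int) : ZMod 1000000007) (List.replicate (2^13) (1 : ZMod 1000000007)) :=
      (pvT_ones hinv).symm
    rw [hdelta]
    have := pvFoldBridge (n := 13) hinv
      (L.map (fun e => ((PySem.Int.mod e 8192).toNat,
        ((evf e : Int) : ZMod 1000000007), ((odf e : Int) : ZMod 1000000007))))
      (by
        intro t ht
        rw [List.mem_map] at ht
        obtain ⟨e, _, rfl⟩ := ht
        have := pvModHat_lt e
        norm_num
        omega)
      (List.replicate (2^13) (1 : ZMod 1000000007)) hones_len
    rw [List.foldl_map, List.foldl_map] at this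
    exact this
  have hdpB_len : dpB.length = 8192 := by
    have := congrArg List.length hzeq
    rw [pvZ_length, pvZ_length, hdpA_len] at this
    omega
  -- final summations
  show PySem.Int.mod _ pvMOD = PySem.Int.mod _ pvMOD
  have hidx : ∀ j ∈ PySem.List.pyRange 0 8192 1, (0:Int) ≤ j ∧ j < 8192 := by
    intro j hj
    rw [PySem.List.mem_pyRange_one] at hj
    exact hj
  have hsum := pvSumFold_bridge hzeq hdpA_len hdpB_len pvSieve
    (PySem.List.pyRange 0 8192 1) hidx 0 0 rfl
  apply pvIntCastInj (pvModRange _).1 (pvModRange _).2 (pvModRange _).1 (pvModRange _).2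
  rw [pvCastMod, pvCastMod]
  exact hsum

-- ===== VERDICT (by name: the statement is the Claim_ definition above) =====
theorem primeXor_spec : Claim_equal_primeXor := by
  intro a _ hpre
  exact pvMain a hpre
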